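-- pv_equiv track=rewrite | github.com/srikrishnakaashyap/Coding_Practice | CommonStrings.py | commonStrings
-- ===== SOURCE A (Python) =====
-- def commonStrings(categories, k):
--
--     categories = list(categories)
--     n = len(categories)
--     prefix = [0 for i in range(n)]
--     s = set()
--     s.add(categories[0])
--     prefix[0] = s.copy()
--
--     for i in range(1, n):
--         s.add(categories[i])
--         prefix[i] = s.copy()
--
--
--     suffix = [0 for i in range(n)]
--     s = set()
--
--     for i in range(n-2, -1, -1):
--         s.add(categories[i + 1])
--         suffix[i] = s.copy()
--
--     answer = 0
--
--     for i in range(n - 1):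
--
--         s1 = prefix[i]
--         s2 = suffix[i]
--         cnt = 0
--
--         for j in s1:
--             if j in s2:
--                 cnt += 1
--         if cnt > k:
--             answer += 1
--
--     return answer
-- ===== SOURCE B (Python) =====
-- def commonStrings(categories, k):
--     categories = list(categories)
--     n = len(categories)
--     counts = {}
--     for c in categories:
--         counts[c] = counts.get(c, 0) + 1
--     seen = set()
--     common = 0
--     answer = 0
--     for i in range(n - 1):
--         c = categories[i]
--         counts[c] -= 1
--         if c not in seen:
--             seen.add(c)
--             if counts[c] > 0:
--                 common += 1
--         else:
--             if counts[c] == 0: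
--                 common -= 1
--         if common > k:
--             answer += 1
--     return answer
-- ===== Notes on version B (the rewrite author's own statement) =====
-- stated objective: faster
-- what changed: Instead of materialising a prefix-set and a suffix-set per index and intersecting them by a nested scan for every split, B makes one pass keeping a seen-set, a suffix frequency dict decremented in place, and a running common-distinct counter updated in O(1) per element.
import Mathlib
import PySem

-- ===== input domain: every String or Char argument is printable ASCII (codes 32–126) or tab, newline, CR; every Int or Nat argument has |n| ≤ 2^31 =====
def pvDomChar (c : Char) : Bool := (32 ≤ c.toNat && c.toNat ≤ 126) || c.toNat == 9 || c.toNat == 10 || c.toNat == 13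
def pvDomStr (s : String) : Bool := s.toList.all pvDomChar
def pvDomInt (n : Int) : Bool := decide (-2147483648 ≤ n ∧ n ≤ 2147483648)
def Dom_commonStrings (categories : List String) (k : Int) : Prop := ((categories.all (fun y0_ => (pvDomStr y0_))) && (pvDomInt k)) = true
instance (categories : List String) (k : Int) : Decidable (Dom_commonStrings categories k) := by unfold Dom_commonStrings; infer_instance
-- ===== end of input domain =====

-- B replaces A's per-split prefix/suffix sets and nested intersection scan by one pass with a
-- running distinct-common counter (asymptotically faster); equivalence proved on non-empty input.

-- ===== PORT A =====
def commonStrings (categories : List String) (k : Int) : Int :=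
  match categories with
  | [] => 0  -- Python raises IndexError here (categories[0]); excluded by Pre_
  | c0 :: _ =>
    let n : Int := PySem.List.len categories
    let s0 : PySem.Set String := PySem.Set.add PySem.Set.empty c0
    let pfx : PySem.Set String × List (PySem.Set String) :=
      (PySem.List.pyRange 1 n 1).foldl
        (fun st i =>
          let s := PySem.Set.add st.1 (PySem.List.pyGetD categories i "")
          (s, st.2 ++ [s]))
        (s0, [s0])
    let sfx : PySem.Set String × List (PySem.Set String) :=
      (PySem.List.pyRange (n - 2) (-1) (-1)).foldl
        (fun st i =>
          let s := PySem.Set.add st.1 (PySem.List.pyGetD categories (i + 1) "")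
          (s, s :: st.2))
        (PySem.Set.empty, [])
    (PySem.List.pyRange 0 (n - 1) 1).foldl
      (fun answer i =>
        let s1 := PySem.List.pyGetD pfx.2 i PySem.Set.empty
        let s2 := PySem.List.pyGetD sfx.2 i PySem.Set.empty
        let cnt : Int := s1.foldl (fun cnt j => if PySem.Set.contains s2 j then cnt + 1 else cnt) 0
        if cnt > k then answer + 1 else answer)
      0

-- ===== PORT B =====
def commonStrings_alt (categories : List String) (k : Int) : Int :=
  let n : Int := PySem.List.len categories
  let counts0 : PySem.Dict String Int :=
    categories.foldl (fun d c => d.insert c (d.getD c 0 + 1)) PySem.Dict.empty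
  let st :=
    (PySem.List.pyRange 0 (n - 1) 1).foldl
      (fun (st : PySem.Dict String Int × PySem.Set String × Int × Int) i =>
        let c := PySem.List.pyGetD categories i ""
        let counts := st.1.insert c (st.1.getD c 0 - 1)
        let seen := st.2.1
        let common := st.2.2.1
        let sc : PySem.Set String × Int :=
          if PySem.Set.contains seen c = false then
            (PySem.Set.add seen c, if counts.getD c 0 > 0 then common + 1 else common)
          else
            (seen, if counts.getD c 0 = 0 then common - 1 else common)
        let answer := if sc.2 > k then st.2.2.2 + 1 else st.2.2.2
        (counts, sc.1, sc.2, answer))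
      (counts0, PySem.Set.empty, 0, 0)
  st.2.2.2

-- ===== PRECONDITION & SPEC =====
-- Pre_ excludes only the empty list, on which Python A raises IndexError (categories[0]).
def Pre_commonStrings (categories : List String) (k : Int) : Prop := categories ≠ []
instance (categories : List String) (k : Int) : Decidable (Pre_commonStrings categories k) := by
  unfold Pre_commonStrings; infer_instance
def pvWitness_commonStrings : List String × Int := (["a", "b", "a"], 1)

def Spec_commonStrings (categories : List String) (k : Int) (out : Int) : Prop := out = commonStrings_alt categories k
instance (categories : List String) (k : Int) (out : Int) : Decidable (Spec_commonStrings categories k out) := by unfold Spec_commonStrings; infer_instance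

-- ===== CLAIM (what is proved, stated in full; the proofs are below) =====
def Claim_equal_commonStrings : Prop := ∀ (categories : List String) (k : Int), Dom_commonStrings categories k → Pre_commonStrings categories k → Spec_commonStrings categories k (commonStrings categories k)

-- ===== LEMMAS AND PROOFS =====

-- number of distinct values common to the first m elements and the rest
def pvCommonAt (cats : List String) (m : Nat) : Int :=
  (((PySem.Set.ofList (cats.take m)).countP (fun v => decide (v ∈ cats.drop m))) : Int)

-- number of splits t < m with pvCommonAt (t+1) > k
def pvAnswer (cats : List String) (k : Int) (m : Nat) : Int :=
  (((List.range m).countP (fun t => decide (pvCommonAt cats (t + 1) > k))) : Int)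

lemma pvOfList_append (l : List String) (x : String) :
    PySem.Set.ofList (l ++ [x]) = PySem.Set.add (PySem.Set.ofList l) x := by
  simp [PySem.Set.ofList_eq_foldl, List.foldl_append]

lemma pvAdd_of_mem {l : List String} {x : String} (h : x ∈ l) :
    PySem.Set.add (PySem.Set.ofList l) x = PySem.Set.ofList l := by
  simp [PySem.Set.add, h]

lemma pvAdd_of_not_mem {l : List String} {x : String} (h : x ∉ l) :
    PySem.Set.add (PySem.Set.ofList l) x = PySem.Set.ofList l ++ [x] := by
  simp [PySem.Set.add, PySem.Set.contains, h]

lemma pvContains_ofList (l : List String) (v : String) :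
    PySem.Set.contains (PySem.Set.ofList l) v = decide (v ∈ l) := by
  simp [pysem]

lemma pvCountP_swap (l : List String) (c : String) (h1 : l.count c = 1)
    (p q : String → Bool) (hpq : ∀ v ∈ l, v ≠ c → p v = q v) :
    (l.countP q : Int) = l.countP p - (if p c then 1 else 0) + (if q c then 1 else 0) := by
  induction l with
  | nil => simp at h1
  | cons a t ih =>
    by_cases hac : a = c
    · subst hac
      have h0 : t.count a = 0 := by
        rw [List.count_cons_self] at h1
        omega
      have hnot : a ∉ t := List.count_eq_zero.mp h0
      have hPQ : t.countP p = t.countP q := by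
        apply List.countP_congr
        intro v hv
        rw [hpq v (List.mem_cons_of_mem _ hv) (fun hvc => hnot (hvc ▸ hv))]
      simp only [List.countP_cons, hPQ]
      by_cases hp : p a <;> by_cases hq : q a <;> simp [hp, hq]
    · have h1' : t.count c = 1 := by
        rwa [List.count_cons_of_ne hac] at h1
      have hpa : p a = q a := hpq a List.mem_cons_self hac
      have := ih h1' (fun v hv hvc => hpq v (List.mem_cons_of_mem _ hv) hvc)
      simp only [List.countP_cons, ← hpa]
      by_cases hp : p a <;> by_cases hpc : p c <;> by_cases hqc : q c <;>
        simp [hp, hpc, hqc] at this ⊢ <;> omega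

lemma pvCommonAt_succ (cats : List String) (m : Nat) (hm : m < cats.length) :
    pvCommonAt cats (m + 1) =
      if cats[m] ∈ cats.take m then
        (if ((cats.drop (m + 1)).count cats[m] : Int) = 0 then pvCommonAt cats m - 1 else pvCommonAt cats m)
      else
        (if ((cats.drop (m + 1)).count cats[m] : Int) > 0 then pvCommonAt cats m + 1 else pvCommonAt cats m) := by
  have hdrop : cats.drop m = cats[m] :: cats.drop (m + 1) := List.drop_eq_getElem_cons hm
  have htake : cats.take (m + 1) = cats.take m ++ [cats[m]] := List.take_succ_eq_append_getElem hm
  have hmem : ∀ v : String, v ≠ cats[m] → ((v ∈ cats.drop (m + 1)) ↔ (v ∈ cats.drop m)) := by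
    intro v hv
    rw [hdrop, List.mem_cons]
    tauto
  have hpc' : cats[m] ∈ cats.drop m := by
    rw [hdrop]
    exact List.mem_cons_self
  unfold pvCommonAt
  rw [htake, pvOfList_append]
  by_cases hc : cats[m] ∈ cats.take m
  · rw [pvAdd_of_mem hc, if_pos hc]
    have hcnt1 : (PySem.Set.ofList (cats.take m)).count cats[m] = 1 :=
      List.count_eq_one_of_mem (PySem.Set.nodup_ofList _) (by rw [PySem.Set.mem_ofList]; exact hc)
    have hswap := pvCountP_swap (PySem.Set.ofList (cats.take m)) cats[m] hcnt1
      (fun v => decide (v ∈ cats.drop m)) (fun v => decide (v ∈ cats.drop (m + 1)))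
      (by intro v _ hv; simp [hmem v hv])
    simp only [decide_eq_true_eq] at hswap
    rw [hswap, if_pos hpc']
    by_cases h2 : cats[m] ∈ cats.drop (m + 1)
    · have hcp : 0 < (cats.drop (m + 1)).count cats[m] := List.count_pos_iff.mpr h2
      rw [if_pos h2, if_neg (by omega)]
      omega
    · have hcz : (cats.drop (m + 1)).count cats[m] = 0 := List.count_eq_zero.mpr h2
      rw [if_neg h2, if_pos (by omega)]
      omega
  · rw [pvAdd_of_not_mem hc, if_neg hc, List.countP_append]
    have hcong : (PySem.Set.ofList (cats.take m)).countP (fun v => decide (v ∈ cats.drop (m + 1)))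
        = (PySem.Set.ofList (cats.take m)).countP (fun v => decide (v ∈ cats.drop m)) := by
      apply List.countP_congr
      intro v hv
      have hvm : v ∈ cats.take m := (PySem.Set.mem_ofList _ _).mp hv
      have : v ≠ cats[m] := fun he => hc (he ▸ hvm)
      simp [hmem v this]
    rw [hcong]
    by_cases h2 : cats[m] ∈ cats.drop (m + 1)
    · have hcp : 0 < (cats.drop (m + 1)).count cats[m] := List.count_pos_iff.mpr h2
      rw [if_pos (by omega)]
      simp [h2]
    · have hcz : (cats.drop (m + 1)).count cats[m] = 0 := List.count_eq_zero.mpr h2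
      rw [if_neg (by omega)]
      simp [h2]

lemma pvAnswer_succ (cats : List String) (k : Int) (m : Nat) :
    pvAnswer cats k (m + 1) =
      if pvCommonAt cats (m + 1) > k then pvAnswer cats k m + 1 else pvAnswer cats k m := by
  unfold pvAnswer
  rw [List.range_succ]
  simp [List.countP_append, List.countP_cons]
  split_ifs with h <;> omega

-- A-side proof helpers: the three loop bodies of commonStrings, named (definitionally equal to the port's lambdas)
def pvStepP (cats : List String) (st : PySem.Set String × List (PySem.Set String)) (i : Int) :
    PySem.Set String × List (PySem.Set String) :=
  let s := PySem.Set.add st.1 (PySem.List.pyGetD cats i "")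
  (s, st.2 ++ [s])

def pvStepS (cats : List String) (st : PySem.Set String × List (PySem.Set String)) (i : Int) :
    PySem.Set String × List (PySem.Set String) :=
  let s := PySem.Set.add st.1 (PySem.List.pyGetD cats (i + 1) "")
  (s, s :: st.2)

def pvBodyA (pfxL sfxL : List (PySem.Set String)) (k : Int) (answer : Int) (i : Int) : Int :=
  let s1 := PySem.List.pyGetD pfxL i PySem.Set.empty
  let s2 := PySem.List.pyGetD sfxL i PySem.Set.empty
  let cnt : Int := s1.foldl (fun cnt j => if PySem.Set.contains s2 j then cnt + 1 else cnt) 0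
  if cnt > k then answer + 1 else answer

lemma pvPfx (c0 : String) (rest : List String) :
    ∀ m : Nat, 1 ≤ m → m ≤ (c0 :: rest).length →
    (PySem.List.pyRange 1 (m : Int) 1).foldl (pvStepP (c0 :: rest))
        (PySem.Set.add PySem.Set.empty c0, [PySem.Set.add PySem.Set.empty c0])
      = (PySem.Set.ofList ((c0 :: rest).take m),
         (List.range m).map (fun j => PySem.Set.ofList ((c0 :: rest).take (j + 1)))) := by
  intro m
  induction m with
  | zero => intro h; omega
  | succ m ih =>
    intro _ hm
    by_cases h1 : m = 0
    · subst h1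
      rw [show (((0 + 1 : Nat)) : Int) = 1 by norm_num, PySem.List.pyRange_one_eq_nil (by omega)]
      simp [List.range_one]
      rfl
    · have ihm := ih (by omega) (by omega)
      have hcast : (((m + 1 : Nat)) : Int) = ((m : Nat) : Int) + 1 := by push_cast; ring
      have hrange : PySem.List.pyRange 1 (((m + 1 : Nat)) : Int) 1
          = PySem.List.pyRange 1 (m : Int) 1 ++ [(m : Int)] := by
        rw [hcast]
        exact PySem.List.pyRange_one_succ_right (by omega)
      rw [hrange, List.foldl_append, ihm]
      simp only [List.foldl_cons, List.foldl_nil]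
      unfold pvStepP
      have hm' : m < (c0 :: rest).length := by omega
      have hget : PySem.List.pyGetD (c0 :: rest) (m : Int) "" = (c0 :: rest)[m] := by
        rw [PySem.List.pyGetD_natCast, List.getD_eq_getElem _ _ hm']
      have hS : PySem.Set.ofList ((c0 :: rest).take (m + 1))
          = PySem.Set.add (PySem.Set.ofList ((c0 :: rest).take m)) (c0 :: rest)[m] := by
        rw [List.take_succ_eq_append_getElem hm', pvOfList_append]
      rw [hget, List.range_succ, List.map_append]
      simp only [List.map_cons, List.map_nil]
      rw [hS]

lemma pvSfx (cats : List String) : ∀ (d a : Nat), a + d = cats.length - 1 →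
    (PySem.List.pyRange (a : Int) ((cats.length : Int) - 1) 1).foldr
        (fun i st => pvStepS cats st i) (PySem.Set.empty, [])
      = (PySem.Set.ofList ((cats.drop (a + 1)).reverse),
         (List.range d).map (fun t => PySem.Set.ofList ((cats.drop (a + 1 + t)).reverse))) := by
  intro d
  induction d with
  | zero =>
    intro a ha
    rw [PySem.List.pyRange_one_eq_nil (by omega)]
    have hnil : cats.drop (a + 1) = [] := List.drop_eq_nil_of_le (by omega)
    simp [hnil]
  | succ d ih =>
    intro a ha
    have hlt : a + 1 < cats.length := by omega
    rw [PySem.List.pyRange_one_cons (by omega)]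
    rw [List.foldr_cons]
    have hcast : ((a : Nat) : Int) + 1 = (((a + 1 : Nat)) : Int) := by push_cast; ring
    rw [hcast, ih (a + 1) (by omega)]
    unfold pvStepS
    have hget : PySem.List.pyGetD cats ((a : Int) + 1) "" = cats[a + 1] := by
      rw [hcast, PySem.List.pyGetD_natCast, List.getD_eq_getElem _ _ hlt]
    have hdrop : cats.drop (a + 1) = cats[a + 1] :: cats.drop (a + 1 + 1) :=
      List.drop_eq_getElem_cons hlt
    have hS : PySem.Set.ofList ((cats.drop (a + 1)).reverse)
        = PySem.Set.add (PySem.Set.ofList ((cats.drop (a + 1 + 1)).reverse)) cats[a + 1] := by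
      rw [hdrop, List.reverse_cons, pvOfList_append]
    rw [hget, List.range_succ_eq_map, List.map_cons]
    simp only [Nat.add_zero, List.map_map]
    rw [hS]
    refine Prod.ext rfl ?_
    show _ :: _ = _ :: _
    congr 1
    apply List.map_congr_left
    intro t _
    simp only [Function.comp_apply]
    have : a + 1 + (t + 1) = a + 1 + 1 + t := by omega
    rw [this]

theorem commonStrings_eq_spec (cats : List String) (k : Int) (h : cats ≠ []) :
    commonStrings cats k = pvAnswer cats k (cats.length - 1) := by
  obtain ⟨c0, rest, rfl⟩ := List.exists_cons_of_ne_nil h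
  have e1 : commonStrings (c0 :: rest) k =
      (PySem.List.pyRange 0 ((PySem.List.len (c0 :: rest)) - 1) 1).foldl
        (pvBodyA
          ((PySem.List.pyRange 1 (PySem.List.len (c0 :: rest)) 1).foldl (pvStepP (c0 :: rest))
            (PySem.Set.add PySem.Set.empty c0, [PySem.Set.add PySem.Set.empty c0])).2
          ((PySem.List.pyRange ((PySem.List.len (c0 :: rest)) - 2) (-1) (-1)).foldl
            (pvStepS (c0 :: rest)) (PySem.Set.empty, [])).2
          k)
        0 := rfl
  rw [e1, PySem.List.len_eq]
  have hL : 1 ≤ (c0 :: rest).length := by simp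
  rw [pvPfx c0 rest ((c0 :: rest).length) hL (le_refl _)]
  have hsr : PySem.List.pyRange (((c0 :: rest).length : Int) - 2) (-1) (-1)
      = (PySem.List.pyRange 0 (((c0 :: rest).length : Int) - 1) 1).reverse := by
    rw [PySem.List.pyRange_neg_one_eq_reverse,
      show ((-1 : Int) + 1) = 0 by norm_num,
      show ((((c0 :: rest).length : Int) - 2) + 1) = (((c0 :: rest).length : Int) - 1) by ring]
  rw [hsr, List.foldl_reverse]
  have hs := pvSfx (c0 :: rest) ((c0 :: rest).length - 1) 0 (by omega)
  push_cast at hs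
  rw [hs]
  rw [PySem.List.pyRange_one 0 (((c0 :: rest).length : Int) - 1)]
  have htn : ((((c0 :: rest).length : Int) - 1) - 0).toNat = (c0 :: rest).length - 1 := by omega
  rw [htn, List.foldl_map]
  have hbody : ∀ j ∈ List.range ((c0 :: rest).length - 1), ∀ acc : Int,
      pvBodyA
        ((List.range (c0 :: rest).length).map (fun j => PySem.Set.ofList ((c0 :: rest).take (j + 1))))
        ((List.range ((c0 :: rest).length - 1)).map
          (fun t => PySem.Set.ofList (((c0 :: rest).drop (1 + t)).reverse)))
        k acc (0 + (j : Int))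
      = (if pvCommonAt (c0 :: rest) (j + 1) > k then acc + 1 else acc) := by
    intro j hj acc
    have hjlt : j < (c0 :: rest).length - 1 := List.mem_range.mp hj
    have hlen : (c0 :: rest).length = rest.length + 1 := rfl
    unfold pvBodyA
    rw [zero_add]
    have h1 : PySem.List.pyGetD
        ((List.range (c0 :: rest).length).map (fun j => PySem.Set.ofList ((c0 :: rest).take (j + 1))))
        (j : Int) PySem.Set.empty = PySem.Set.ofList ((c0 :: rest).take (j + 1)) := by
      rw [PySem.List.pyGetD_natCast]
      exact PySem.List.getD_map_range _ _ _ _ (by omega)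
    have h2 : PySem.List.pyGetD
        ((List.range ((c0 :: rest).length - 1)).map
          (fun t => PySem.Set.ofList (((c0 :: rest).drop (1 + t)).reverse)))
        (j : Int) PySem.Set.empty = PySem.Set.ofList (((c0 :: rest).drop (j + 1)).reverse) := by
      rw [PySem.List.pyGetD_natCast]
      rw [PySem.List.getD_map_range _ _ _ _ (by omega)]
      rw [show 1 + j = j + 1 from Nat.add_comm 1 j]
    simp only [h1, h2]
    rw [PySem.List.foldl_ite_add_one]
    have hcnt : (PySem.Set.ofList ((c0 :: rest).take (j + 1))).countP
          (fun x => decide (PySem.Set.contains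
            (PySem.Set.ofList (((c0 :: rest).drop (j + 1)).reverse)) x = true))
        = (PySem.Set.ofList ((c0 :: rest).take (j + 1))).countP
          (fun v => decide (v ∈ (c0 :: rest).drop (j + 1))) := by
      apply List.countP_congr
      intro v _
      simp
    rw [hcnt]
    unfold pvCommonAt
    rw [zero_add]
  simp only []
  rw [PySem.List.foldl_congr_mem' _ _
    (fun acc j => if pvCommonAt (c0 :: rest) (j + 1) > k then acc + 1 else acc) _ hbody,
    PySem.List.foldl_ite_add_one]
  unfold pvAnswer
  rw [zero_add]

-- B-side proof helpers: the loop body of commonStrings_alt, named (definitionally equal to the port's lambda)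
def pvBodyB (cats : List String) (k : Int)
    (st : PySem.Dict String Int × PySem.Set String × Int × Int) (i : Int) :
    PySem.Dict String Int × PySem.Set String × Int × Int :=
  let c := PySem.List.pyGetD cats i ""
  let counts := st.1.insert c (st.1.getD c 0 - 1)
  let seen := st.2.1
  let common := st.2.2.1
  let sc : PySem.Set String × Int :=
    if PySem.Set.contains seen c = false then
      (PySem.Set.add seen c, if counts.getD c 0 > 0 then common + 1 else common)
    else
      (seen, if counts.getD c 0 = 0 then common - 1 else common)
  let answer := if sc.2 > k then st.2.2.2 + 1 else st.2.2.2
  (counts, sc.1, sc.2, answer)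

def pvCounts (cats : List String) : PySem.Dict String Int :=
  cats.foldl (fun d c => d.insert c (d.getD c 0 + 1)) PySem.Dict.empty

lemma pvCounts_getD (cats : List String) : ∀ (d : PySem.Dict String Int) (v : String),
    (cats.foldl (fun d c => d.insert c (d.getD c 0 + 1)) d).getD v 0 = d.getD v 0 + cats.count v := by
  induction cats with
  | nil => simp
  | cons a t ih =>
    intro d v
    simp only [List.foldl_cons]
    rw [ih, PySem.Dict.getD_insert]
    by_cases hv : v = a
    · subst hv
      rw [List.count_cons_self, if_pos rfl]
      push_cast
      omega
    · rw [List.count_cons_of_ne (Ne.symm hv), if_neg hv]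

lemma pvLoopB (cats : List String) (k : Int) : ∀ m : Nat, m ≤ cats.length →
    ∃ d : PySem.Dict String Int,
      (PySem.List.pyRange 0 (m : Int) 1).foldl (pvBodyB cats k) (pvCounts cats, PySem.Set.empty, 0, 0)
        = (d, PySem.Set.ofList (cats.take m), pvCommonAt cats m, pvAnswer cats k m)
      ∧ ∀ v : String, d.getD v 0 = ((cats.drop m).count v : Int) := by
  intro m
  induction m with
  | zero =>
    intro _
    refine ⟨pvCounts cats, ?_, ?_⟩
    · simp [PySem.List.pyRange_one_eq_nil, pvCommonAt, pvAnswer, PySem.Set.empty]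
    · intro v
      unfold pvCounts
      rw [pvCounts_getD]
      simp
  | succ m ih =>
    intro hm1
    have hm : m < cats.length := by omega
    obtain ⟨d, hfold, hd⟩ := ih (by omega)
    have hdrop : cats.drop m = cats[m] :: cats.drop (m + 1) := List.drop_eq_getElem_cons hm
    have htake : cats.take (m + 1) = cats.take m ++ [cats[m]] := List.take_succ_eq_append_getElem hm
    have hcast : (((m + 1 : Nat)) : Int) = ((m : Nat) : Int) + 1 := by push_cast; ring
    have hrange : PySem.List.pyRange 0 (((m + 1 : Nat)) : Int) 1
        = PySem.List.pyRange 0 (m : Int) 1 ++ [(m : Int)] := by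
      rw [hcast]
      exact PySem.List.pyRange_one_succ_right (by positivity)
    rw [hrange, List.foldl_append, hfold]
    have hc : PySem.List.pyGetD cats (m : Int) "" = cats[m] := by
      rw [PySem.List.pyGetD_natCast, List.getD_eq_getElem _ _ hm]
    have hcount : ((cats.drop (m + 1)).count cats[m] : Int) = d.getD cats[m] 0 - 1 := by
      rw [hd cats[m], hdrop, List.count_cons_self]
      push_cast
      ring
    have hd' : ∀ v : String, (d.insert cats[m] (d.getD cats[m] 0 - 1)).getD v 0
        = ((cats.drop (m + 1)).count v : Int) := by
      intro v
      rw [PySem.Dict.getD_insert]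
      by_cases hv : v = cats[m]
      · subst hv
        rw [if_pos rfl]
        omega
      · rw [if_neg hv, hd v, hdrop, List.count_cons_of_ne (fun he => hv he.symm)]
    refine ⟨d.insert cats[m] (d.getD cats[m] 0 - 1), ?_, hd'⟩
    simp only [List.foldl_cons, List.foldl_nil]
    unfold pvBodyB
    simp only [hc, pvContains_ofList]
    rw [hd' cats[m]]
    by_cases hmem : cats[m] ∈ cats.take m
    · simp only [hmem, decide_true, Bool.true_eq_false, if_false]
      have hC : pvCommonAt cats (m + 1)
          = (if ((cats.drop (m + 1)).count cats[m] : Int) = 0 then pvCommonAt cats m - 1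
             else pvCommonAt cats m) := by
        rw [pvCommonAt_succ cats m hm, if_pos hmem]
      have hS : PySem.Set.ofList (cats.take (m + 1)) = PySem.Set.ofList (cats.take m) := by
        rw [htake, pvOfList_append, pvAdd_of_mem hmem]
      rw [pvAnswer_succ, hC, hS]
    · simp only [hmem, decide_false, if_true]
      have hC : pvCommonAt cats (m + 1)
          = (if ((cats.drop (m + 1)).count cats[m] : Int) > 0 then pvCommonAt cats m + 1
             else pvCommonAt cats m) := by
        rw [pvCommonAt_succ cats m hm, if_neg hmem]
      have hS : PySem.Set.ofList (cats.take (m + 1))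
          = PySem.Set.add (PySem.Set.ofList (cats.take m)) cats[m] := by
        rw [htake, pvOfList_append]
      rw [pvAnswer_succ, hC, hS]

theorem commonStrings_alt_eq_spec (cats : List String) (k : Int) :
    commonStrings_alt cats k = pvAnswer cats k (cats.length - 1) := by
  rcases List.eq_nil_or_concat cats with rfl | ⟨_, _, _⟩
  · rfl
  · have hlen : 1 ≤ cats.length := by
      rename_i h
      subst h
      simp
    obtain ⟨d, hfold, _⟩ := pvLoopB cats k (cats.length - 1) (by omega)
    have hcast : ((cats.length : Int) - 1) = (((cats.length - 1 : Nat)) : Int) := by omega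
    show ((PySem.List.pyRange 0 ((PySem.List.len cats) - 1) 1).foldl (pvBodyB cats k)
        (pvCounts cats, PySem.Set.empty, 0, 0)).2.2.2 = _
    rw [PySem.List.len_eq, hcast, hfold]

-- ===== VERDICT (by name: the statement is the Claim_ definition above) =====
theorem commonStrings_spec : Claim_equal_commonStrings := by
  intro cats k _ hpre
  unfold Spec_commonStrings
  rw [commonStrings_eq_spec cats k hpre, commonStrings_alt_eq_spec cats k]
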